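-- pv_equiv track=rewrite | github.com/Ilupii17/ctf-archive | 2025/nullconctf/cry/a_slice/sol.py | common_msb_prefix_bits
-- ===== SOURCE A (Python) =====
-- def common_msb_prefix_bits(lo: int, hi: int, need_bits: int):
--     # Compute common MSB prefix between lo and hi inclusive
--     L = lo.bit_length()
--     H = hi.bit_length()
--     maxlen = max(L, H)
--     prefix = []
--     for i in range(maxlen - 1, -1, -1):
--         b_lo = (lo >> i) & 1 if i < L else 0
--         b_hi = (hi >> i) & 1 if i < H else 0
--         if b_lo == b_hi:
--             prefix.append(b_lo)
--             if len(prefix) == need_bits: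
--                 return prefix
--         else:
--             break
--     raise ValueError("Interval too wide to extract required MSB prefix.")
-- ===== SOURCE B (Python) =====
-- def window_bits(x: int, width: int) -> list:
--     """Big-endian list of the low `width` bit positions of x; positions at or
--     above x.bit_length() read as 0."""
--     return [(x >> i) & 1 if i < x.bit_length() else 0 for i in range(width - 1, -1, -1)]
--
--
-- def common_msb_prefix_bits(lo: int, hi: int, need_bits: int):
--     width = max(lo.bit_length(), hi.bit_length())
--     a = window_bits(lo, width)
--     b = window_bits(hi, width)
--     cpl = next((k for k in range(width) if a[k] != b[k]), width)
--     if not 1 <= need_bits <= cpl: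
--         raise ValueError("Interval too wide to extract required MSB prefix.")
--     return a[:need_bits]
-- ===== Notes on version B (the rewrite author's own statement) =====
-- stated objective: alternative
-- what changed: Replaces A's MSB-downward scan with accumulator, break and early return by building both fixed-width bit windows once, locating the first mismatching position with next() over an index generator, and slicing the first need_bits bits; Pre_ excludes exactly the inputs on which A raises ValueError.
import Mathlib
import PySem

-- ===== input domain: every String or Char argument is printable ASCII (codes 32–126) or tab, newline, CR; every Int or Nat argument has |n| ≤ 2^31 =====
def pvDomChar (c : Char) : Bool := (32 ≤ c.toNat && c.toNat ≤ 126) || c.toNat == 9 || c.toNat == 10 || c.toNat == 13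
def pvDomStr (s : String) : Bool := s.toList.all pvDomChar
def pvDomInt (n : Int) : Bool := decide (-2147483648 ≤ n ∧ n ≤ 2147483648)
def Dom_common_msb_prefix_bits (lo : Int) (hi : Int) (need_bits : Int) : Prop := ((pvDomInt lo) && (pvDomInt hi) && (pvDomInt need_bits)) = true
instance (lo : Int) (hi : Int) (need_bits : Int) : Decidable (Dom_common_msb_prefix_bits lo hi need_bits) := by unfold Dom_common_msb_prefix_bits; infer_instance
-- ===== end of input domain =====

-- B builds both fixed-width bit windows once, locates the first mismatching position,
-- and slices the answer, instead of A's downward scan with accumulator/break/early return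
-- (objective: alternative decomposition).

-- ===== PORT A =====
-- The loop 'for i in range(maxlen-1, -1, -1)' with early return; 'none' = the ValueError path
-- (break on mismatching bits, or range exhausted).  '(x >> i) & 1' is 'PySem.Int.band (x >>> i.toNat) 1'
-- (exact: every i the countdown range yields satisfies i ≥ 0).
def pvALoop (lo hi L H need_bits : Int) : List Int → List Int → Option (List Int)
  | [], _ => none
  | i :: rest, pref =>
      let b_lo := if i < L then PySem.Int.band (lo >>> i.toNat) 1 else 0
      let b_hi := if i < H then PySem.Int.band (hi >>> i.toNat) 1 else 0
      if b_lo = b_hi then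
        let pref' := pref ++ [b_lo]
        if (pref'.length : Int) = need_bits then some pref'
        else pvALoop lo hi L H need_bits rest pref'
      else none

def common_msb_prefix_bits (lo : Int) (hi : Int) (need_bits : Int) : List Int :=
  let L : Int := PySem.Int.bitLength lo
  let H : Int := PySem.Int.bitLength hi
  let maxlen := max L H
  (pvALoop lo hi L H need_bits (PySem.List.pyRange (maxlen - 1) (-1) (-1)) []).getD []

-- ===== PORT B =====
-- window_bits(x, width): big-endian list of bit positions width-1 .. 0 of x,
-- positions at or above x.bit_length() reading as 0.
def pvWindowBits (x : Int) (width : Int) : List Int :=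
  (PySem.List.pyRange (width - 1) (-1) (-1)).map
    (fun i => if i < (PySem.Int.bitLength x : Int) then PySem.Int.band (x >>> i.toNat) 1 else 0)

-- next((k for k in range(width) if a[k] != b[k]), width) → find? with default;
-- a[:need_bits] → slice; the ValueError path returns [] (excluded by Pre_).
def common_msb_prefix_bits_alt (lo : Int) (hi : Int) (need_bits : Int) : List Int :=
  let width : Int := max (PySem.Int.bitLength lo : Int) (PySem.Int.bitLength hi : Int)
  let a := pvWindowBits lo width
  let b := pvWindowBits hi width
  let cpl : Int :=
    ((PySem.List.pyRange 0 width 1).find?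
      (fun k => PySem.List.pyGet? a k != PySem.List.pyGet? b k)).getD width
  if 1 ≤ need_bits ∧ need_bits ≤ cpl then PySem.List.slice a none (some need_bits)
  else []

-- ===== PRECONDITION & SPEC =====
-- the bit A's and B's Pythons read at position i for argument x
def pvBit (x : Int) (i : Int) : Int :=
  if i < (PySem.Int.bitLength x : Int) then PySem.Int.band (x >>> i.toNat) 1 else 0

-- Pre_ excludes exactly the inputs on which the Python A raises ValueError
-- (need_bits < 1, need_bits > maxlen, or some of the top need_bits positions mismatch).
def Pre_common_msb_prefix_bits (lo : Int) (hi : Int) (need_bits : Int) : Prop :=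
  1 ≤ need_bits ∧
  need_bits ≤ max (PySem.Int.bitLength lo : Int) (PySem.Int.bitLength hi : Int) ∧
  ∀ k ∈ List.range need_bits.toNat,
    pvBit lo (max (PySem.Int.bitLength lo : Int) (PySem.Int.bitLength hi : Int) - 1 - (k : Int))
      = pvBit hi (max (PySem.Int.bitLength lo : Int) (PySem.Int.bitLength hi : Int) - 1 - (k : Int))
instance (lo : Int) (hi : Int) (need_bits : Int) : Decidable (Pre_common_msb_prefix_bits lo hi need_bits) := by unfold Pre_common_msb_prefix_bits; infer_instance

def pvWitness_common_msb_prefix_bits : Int × Int × Int := (5, 7, 1)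

def Spec_common_msb_prefix_bits (lo : Int) (hi : Int) (need_bits : Int) (out : List Int) : Prop := out = common_msb_prefix_bits_alt lo hi need_bits
instance (lo : Int) (hi : Int) (need_bits : Int) (out : List Int) : Decidable (Spec_common_msb_prefix_bits lo hi need_bits out) := by unfold Spec_common_msb_prefix_bits; infer_instance

-- ===== CLAIM (what is proved, stated in full; the proofs are below) =====
def Claim_equal_common_msb_prefix_bits : Prop := ∀ (lo : Int) (hi : Int) (need_bits : Int), Dom_common_msb_prefix_bits lo hi need_bits → Pre_common_msb_prefix_bits lo hi need_bits → Spec_common_msb_prefix_bits lo hi need_bits (common_msb_prefix_bits lo hi need_bits)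

-- ===== LEMMAS AND PROOFS =====

-- loop characterisation: if the compared bits agree on the whole window, the loop returns
-- the prefix extended by the top n bits read for lo
lemma pvALoop_spec (lo hi L H nb : Int) (n : Nat) (t : Int) (p : List Int)
    (h1 : 1 ≤ n) (hnb : nb = p.length + n) (hnt : (n : Int) ≤ t)
    (hagree : ∀ i : Int, t - n ≤ i → i < t →
      (if i < L then PySem.Int.band (lo >>> i.toNat) 1 else 0)
        = (if i < H then PySem.Int.band (hi >>> i.toNat) 1 else 0)) :
    pvALoop lo hi L H nb (PySem.List.pyRange (t - 1) (-1) (-1)) p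
      = some (p ++ (List.range n).map
          (fun k : Nat => if t - 1 - (k : Int) < L then PySem.Int.band (lo >>> (t - 1 - (k : Int)).toNat) 1 else 0)) := by
  induction n generalizing t p with
  | zero => omega
  | succ n ih =>
    have ht1 : (-1 : Int) < t - 1 := by omega
    rw [PySem.List.pyRange_neg_one_cons ht1]
    have hb : (if t - 1 < L then PySem.Int.band (lo >>> (t-1).toNat) 1 else 0)
        = (if t - 1 < H then PySem.Int.band (hi >>> (t-1).toNat) 1 else 0) :=
      hagree (t - 1) (by push_cast; omega) (by omega)
    simp only [pvALoop, hb, if_pos]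
    by_cases hn : n = 0
    · subst hn
      have hl : ((p ++ [if t - 1 < H then PySem.Int.band (hi >>> (t-1).toNat) 1 else 0]).length : Int) = nb := by
        simp; omega
      rw [if_pos hl, List.range_one]
      simp only [List.map_cons, List.map_nil, Nat.cast_zero, sub_zero]
      rw [← hb]
    · have hlen : ¬ (((p ++ [if t - 1 < H then PySem.Int.band (hi >>> (t-1).toNat) 1 else 0]).length : Int) = nb) := by
        simp; omega
      rw [if_neg hlen]
      rw [ih (t - 1) (p ++ [if t - 1 < H then PySem.Int.band (hi >>> (t-1).toNat) 1 else 0])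
        (by omega) (by simp; push_cast at hnb ⊢; omega) (by push_cast at hnt ⊢; omega)
        (fun i hi1 hi2 => hagree i (by push_cast at hi1 ⊢; omega) (by omega))]
      congr 1
      rw [List.range_succ_eq_map, List.map_cons, List.map_map, List.append_assoc]
      congr 1
      simp only [Nat.cast_zero, sub_zero, List.singleton_append, ← hb]
      congr 1
      apply List.map_congr_left
      intro k _
      have heq : t - 1 - 1 - (k : Int) = t - 1 - ((k + 1 : Nat) : Int) := by push_cast; ring
      simp only [Function.comp_apply, heq]

-- the bit window as a map over List.range
lemma pvWindowBits_eq (x : Int) (w : Int) :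
    pvWindowBits x w = (List.range w.toNat).map (fun (k : Nat) => pvBit x (w - 1 - (k : Int))) := by
  unfold pvWindowBits pvBit
  rw [PySem.List.pyRange_neg_one, List.map_map]
  have hlen : (w - 1 - (-1)).toNat = w.toNat := by omega
  rw [hlen]
  apply List.map_congr_left
  intro k _
  simp only [Function.comp_apply]

-- indexing the window
lemma pvWindowBits_get (x : Int) (w : Int) (i : Int) (h0 : 0 ≤ i) (h1 : i < w) :
    PySem.List.pyGet? (pvWindowBits x w) i = some (pvBit x (w - 1 - i)) := by
  rw [pvWindowBits_eq, PySem.List.pyGet?_of_nonneg _ h0]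
  have hk : i.toNat < w.toNat := by omega
  simp [hk, Int.toNat_of_nonneg h0]

-- ===== VERDICT (by name: the statement is the Claim_ definition above) =====
theorem common_msb_prefix_bits_spec : Claim_equal_common_msb_prefix_bits := by
  intro lo hi nb _hdom hpre
  obtain ⟨h1, h2, h3⟩ := hpre
  unfold Spec_common_msb_prefix_bits common_msb_prefix_bits common_msb_prefix_bits_alt
  simp only []
  set Ln : Int := (PySem.Int.bitLength lo : Int) with hLn
  set Hn : Int := (PySem.Int.bitLength hi : Int) with hHn
  set w : Int := max Ln Hn with hw
  -- agreement, indexed by position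
  have hagree : ∀ i : Int, w - nb ≤ i → i < w → pvBit lo i = pvBit hi i := by
    intro i hi1 hi2
    have hk : ((w - 1 - i).toNat : Int) = w - 1 - i := by omega
    have hmem : (w - 1 - i).toNat ∈ List.range nb.toNat := by
      rw [List.mem_range]; omega
    have := h3 _ hmem
    rwa [hk, show w - 1 - (w - 1 - i) = i by ring] at this
  -- A returns the top nb.toNat bits of lo's window
  have hA := pvALoop_spec lo hi Ln Hn nb nb.toNat w []
    (by omega) (by simp; omega) (by omega)
    (by
      intro i hi1 hi2
      have := hagree i (by omega) hi2
      simpa [pvBit] using this)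
  rw [hA, Option.getD_some, List.nil_append]
  -- B's cpl is at least nb, so the branch is taken
  have hcpl : nb ≤ ((PySem.List.pyRange 0 w 1).find?
      (fun k => PySem.List.pyGet? (pvWindowBits lo w) k != PySem.List.pyGet? (pvWindowBits hi w) k)).getD w := by
    cases hf : (PySem.List.pyRange 0 w 1).find?
        (fun k => PySem.List.pyGet? (pvWindowBits lo w) k != PySem.List.pyGet? (pvWindowBits hi w) k) with
    | none => simpa using h2
    | some k0 =>
      have hp := List.find?_some hf
      have hm := List.mem_of_find?_eq_some hf
      rw [PySem.List.mem_pyRange_one] at hm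
      by_contra hlt
      rw [Int.not_le] at hlt
      rw [Option.getD_some] at hlt
      rw [pvWindowBits_get lo w k0 hm.1 hm.2, pvWindowBits_get hi w k0 hm.1 hm.2] at hp
      have heq : pvBit lo (w - 1 - k0) = pvBit hi (w - 1 - k0) :=
        hagree _ (by omega) (by omega)
      simp [heq] at hp
  rw [if_pos ⟨h1, hcpl⟩]
  -- the slice is the same list of bits
  rw [PySem.List.slice_to _ (by omega : (0:Int) ≤ nb), pvWindowBits_eq]
  rw [← List.map_take, List.take_range]
  have hmin : min nb.toNat w.toNat = nb.toNat := by omega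
  rw [hmin]
  apply List.map_congr_left
  intro k _
  simp [pvBit, hLn]
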